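-- pv_equiv track=rewrite | github.com/dozmus/advent-of-code | 2019/day4.py | is_valid_password_adjacents_exactly_len_2
-- ===== SOURCE A (Python) =====
-- def has_only_n_consecutive(x, n):
--     s = ''
--
--     for e in x:
--         if len(s) == 0 or s[0] == e:
--             s += e
--         else:
--             if len(s) == n:
--                 return True
--
--             s = e
--
--     if s != '':
--         return len(s) == n
--
--     return False
--
-- def is_valid_password_adjacents_exactly_len_2(x):
--     digits = str(x)
--
--     if len(digits) != 6:
--         return False
--
--     for i, j in zip(digits, digits[1:]):
--         if i > j:  # decreasing
--             return False
--
--     return has_only_n_consecutive(digits, 2)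
-- ===== SOURCE B (Python) =====
-- def is_valid_password_adjacents_exactly_len_2(x):
--     digits = list(str(x))
--     return (len(digits) == 6
--             and sorted(digits) == digits
--             and any(digits.count(d) == 2 for d in digits))
-- ===== Notes on version B (the rewrite author's own statement) =====
-- stated objective: alternative
-- what changed: Replaces A's adjacent-pair scan and char-by-char run-tracking state machine with early returns by a sort-and-compare check (sorted(digits) == digits) and an occurrence-count check (any(digits.count(d) == 2)), which is correct because in a sorted string each value's run length equals its total multiplicity.
import Mathlib
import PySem

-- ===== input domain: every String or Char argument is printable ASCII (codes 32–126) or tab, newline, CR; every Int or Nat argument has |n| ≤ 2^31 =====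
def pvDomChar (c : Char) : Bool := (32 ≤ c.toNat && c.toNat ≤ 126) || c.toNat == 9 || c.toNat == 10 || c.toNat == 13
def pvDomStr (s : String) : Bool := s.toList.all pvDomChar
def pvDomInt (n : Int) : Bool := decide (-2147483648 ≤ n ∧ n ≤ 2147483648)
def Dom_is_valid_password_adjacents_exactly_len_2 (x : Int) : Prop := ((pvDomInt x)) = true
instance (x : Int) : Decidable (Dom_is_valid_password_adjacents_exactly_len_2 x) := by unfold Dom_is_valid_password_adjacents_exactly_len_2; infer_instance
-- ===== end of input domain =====

-- B replaces A's adjacent-pair scan and run-tracking state machine by a sort-and-compare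
-- check plus an occurrence-count check (in a sorted string runs = multiplicities) (alternative).


-- ===== PORT A =====
-- A's helper: walks the chars, threading the current run `s` (here a List Char built by append),
-- with early return True when a finished run has length n; at the end checks the last run.
def hasOnlyNConsecutiveGo (n : Int) : List Char → List Char → Bool
  | [], s => if s ≠ [] then ((s.length : Int) == n) else false
  | e :: rest, s =>
      if s.length = 0 || s.head? == some e then
        hasOnlyNConsecutiveGo n rest (s ++ [e])
      else if (s.length : Int) == n then true
      else hasOnlyNConsecutiveGo n rest [e]

def has_only_n_consecutive (x : List Char) (n : Int) : Bool :=
  hasOnlyNConsecutiveGo n x []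

def is_valid_password_adjacents_exactly_len_2 (x : Int) : Bool :=
  let digits := (PySem.Int.toStr x).toList
  if digits.length ≠ 6 then false
  else if (digits.zip (digits.drop 1)).any (fun p => p.2 < p.1) then false  -- `return False` on a decreasing pair
  else has_only_n_consecutive digits 2

-- ===== PORT B =====
def is_valid_password_adjacents_exactly_len_2_alt (x : Int) : Bool :=
  let digits := (PySem.Int.toStr x).toList
  decide (digits.length = 6)
    && (PySem.List.sorted digits (fun c => c) == digits)
    && digits.any (fun d => digits.count d == 2)

-- ===== PRECONDITION & SPEC =====
def Spec_is_valid_password_adjacents_exactly_len_2 (x : Int) (out : Bool) : Prop := out = is_valid_password_adjacents_exactly_len_2_alt x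
instance (x : Int) (out : Bool) : Decidable (Spec_is_valid_password_adjacents_exactly_len_2 x out) := by unfold Spec_is_valid_password_adjacents_exactly_len_2; infer_instance

-- ===== CLAIM (what is proved, stated in full; the proofs are below) =====
def Claim_equal_is_valid_password_adjacents_exactly_len_2 : Prop := ∀ (x : Int), Dom_is_valid_password_adjacents_exactly_len_2 x → Spec_is_valid_password_adjacents_exactly_len_2 x (is_valid_password_adjacents_exactly_len_2 x)

-- ===== LEMMAS AND PROOFS =====

-- Proof-side helper: the lengths of the maximal consecutive-equal runs of a list.
def runLensGo (c : Char) (k : Nat) : List Char → List Nat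
  | [] => [k]
  | d :: ds => if d == c then runLensGo c (k + 1) ds else k :: runLensGo d 1 ds

-- A's run-tracking loop, started with current run = k copies of c (k ≥ 1), answers exactly
-- "some run length among (current run continued into rest) equals 2".
theorem go_eq_runLens (rest : List Char) : ∀ (c : Char) (k : Nat), 1 ≤ k →
    hasOnlyNConsecutiveGo 2 rest (List.replicate k c) = (runLensGo c k rest).any (fun m => m == 2) := by
  induction rest with
  | nil =>
      intro c k hk
      have hne : List.replicate k c ≠ [] := by simp; omega
      simp only [hasOnlyNConsecutiveGo, runLensGo, hne, List.length_replicate, ne_eq,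
        not_false_eq_true, if_true, List.any_cons, List.any_nil, Bool.or_false]
      by_cases hk2 : k = 2 <;> simp [hk2]
      omega
  | cons e rest ih =>
      intro c k hk
      have h1 : (List.replicate k c).head? = some c := by
        cases k with
        | zero => omega
        | succ m => simp [List.replicate_succ]
      by_cases he : e = c
      · subst he
        have h2 : List.replicate k e ++ [e] = List.replicate (k + 1) e := by
          simp [List.replicate_succ']
        simp [hasOnlyNConsecutiveGo, runLensGo, h1, h2, ih e (k + 1) (by omega)]
      · simp only [hasOnlyNConsecutiveGo, runLensGo, List.length_replicate]
        have hrepl1 : [e] = List.replicate 1 e := rfl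
        rw [hrepl1, ih e 1 (by omega)]
        have hec : (e == c) = false := by simp [he]
        by_cases hk2 : k = 2
        · simp [hk2, hec]
          exact Or.inl fun h => he h.symm
        · have hne2 : ((k : Int) == 2) = false := by simp; omega
          have hne3 : (k == 2) = false := by simp [hk2]
          simp [hec, hne2, hne3]
          intro h
          rcases h with h | h
          · omega
          · rw [h1] at h
            exact absurd (Option.some.inj h).symm he

-- No decreasing adjacent pair ⟺ the chain of adjacent ≤ holds.
theorem zip_adj_no_decrease (l : List Char) :
    ((l.zip (l.drop 1)).any (fun p => p.2 < p.1) = false) ↔ l.IsChain (· ≤ ·) := by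
  induction l with
  | nil => simp
  | cons a t ih =>
      cases t with
      | nil => simp
      | cons b t' =>
          simp only [List.drop_one, List.tail_cons, List.zip_cons_cons, List.any_cons,
            Bool.or_eq_false_iff, List.isChain_cons_cons, decide_eq_false_iff_not, not_lt] at *
          tauto

-- In a list with Pairwise (· ≤ ·) headed by c (k copies of c already consumed), a run of
-- length 2 exists iff c's total multiplicity reaches 2 or some other value occurs exactly twice.
theorem runLens_count (cs : List Char) : ∀ (c : Char) (k : Nat),
    List.Pairwise (· ≤ ·) (c :: cs) →
    ((runLensGo c k cs).any (fun m => m == 2) = true ↔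
      (k + cs.count c = 2 ∨ ∃ d, d ≠ c ∧ cs.count d = 2)) := by
  induction cs with
  | nil =>
      intro c k _
      simp [runLensGo]
  | cons d ds ih =>
      intro c k hp
      have hp' : List.Pairwise (· ≤ ·) (d :: ds) := hp.of_cons
      by_cases hdc : d = c
      · subst hdc
        simp only [runLensGo, BEq.rfl, if_true]
        rw [ih d (k + 1) hp']
        constructor
        · rintro (h | ⟨e, he, hc⟩)
          · left; rw [List.count_cons_self]; omega
          · right; exact ⟨e, he, by rw [List.count_cons_of_ne (Ne.symm he)]; exact hc⟩
        · rintro (h | ⟨e, he, hc⟩)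
          · left; rw [List.count_cons_self] at h; omega
          · right; refine ⟨e, he, ?_⟩; rw [List.count_cons_of_ne (Ne.symm he)] at hc; exact hc
      · have hcd : c < d := lt_of_le_of_ne (List.rel_of_pairwise_cons hp (by simp)) (Ne.symm hdc)
        have hdsc : ds.count c = 0 := by
          rw [List.count_eq_zero]
          intro hmem
          exact absurd (lt_of_lt_of_le hcd (List.rel_of_pairwise_cons hp' hmem)) (lt_irrefl c)
        have hcnd : c ≠ d := fun h => hdc h.symm
        have hdcb : (d == c) = false := by simp [hdc]
        have hcount0 : (d :: ds).count c = 0 := by rw [List.count_cons_of_ne hdc]; exact hdsc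
        simp only [runLensGo, hdcb, Bool.false_eq_true, if_false, List.any_cons,
          Bool.or_eq_true, beq_iff_eq]
        rw [ih d 1 hp', hcount0]
        constructor
        · rintro (h | h | ⟨e, he, hc⟩)
          · left; omega
          · right; exact ⟨d, hdc, by rw [List.count_cons_self]; omega⟩
          · right
            refine ⟨e, fun hec => by rw [hec, hdsc] at hc; omega,
              by rw [List.count_cons_of_ne (Ne.symm he)]; exact hc⟩
        · rintro (h | ⟨e, he, hc⟩)
          · left; omega
          · by_cases hed : e = d
            · subst hed
              rw [List.count_cons_self] at hc
              right; left; omega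
            · right; right
              rw [List.count_cons_of_ne (Ne.symm hed)] at hc
              exact ⟨e, hed, hc⟩

-- On a Pairwise-(≤) list the A-side run check equals the B-side multiplicity check.
theorem runs_eq_counts (l : List Char) (hp : List.Pairwise (· ≤ ·) l) :
    has_only_n_consecutive l 2 = l.any (fun d => l.count d == 2) := by
  cases l with
  | nil => simp [has_only_n_consecutive, hasOnlyNConsecutiveGo]
  | cons c cs =>
      have h0 : hasOnlyNConsecutiveGo 2 (c :: cs) [] = hasOnlyNConsecutiveGo 2 cs [c] := by
        simp [hasOnlyNConsecutiveGo]
      have h1 : [c] = List.replicate 1 c := rfl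
      rw [has_only_n_consecutive, h0, h1, go_eq_runLens cs c 1 (by omega)]
      have hiff := runLens_count cs c 1 hp
      have hany : ((c :: cs).any (fun d => (c :: cs).count d == 2) = true) ↔
          (1 + cs.count c = 2 ∨ ∃ d, d ≠ c ∧ cs.count d = 2) := by
        simp only [List.any_eq_true, beq_iff_eq]
        constructor
        · rintro ⟨d, _, hc⟩
          by_cases hdc : d = c
          · subst hdc; left; rw [List.count_cons_self] at hc; omega
          · right; rw [List.count_cons_of_ne (Ne.symm hdc)] at hc; exact ⟨d, hdc, hc⟩
        · rintro (h | ⟨d, hdc, hc⟩)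
          · exact ⟨c, by simp, by rw [List.count_cons_self]; omega⟩
          · refine ⟨d, ?_, by rw [List.count_cons_of_ne (Ne.symm hdc)]; exact hc⟩
            right
            exact List.count_pos_iff.mp (by omega)
      rw [Bool.eq_iff_iff, hiff, hany]

-- ===== VERDICT (by name: the statement is the Claim_ definition above) =====
theorem is_valid_password_adjacents_exactly_len_2_spec : Claim_equal_is_valid_password_adjacents_exactly_len_2 := by
  intro x _
  unfold Spec_is_valid_password_adjacents_exactly_len_2
  unfold is_valid_password_adjacents_exactly_len_2 is_valid_password_adjacents_exactly_len_2_alt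
  set digits := (PySem.Int.toStr x).toList with hd
  by_cases hlen : digits.length = 6
  · simp only [hlen, ne_eq, not_true_eq_false, if_false, decide_true, Bool.true_and]
    by_cases hp : List.Pairwise (· ≤ ·) digits
    · have hchain : digits.IsChain (· ≤ ·) := List.isChain_iff_pairwise.mpr hp
      have hz : (digits.zip (digits.drop 1)).any (fun p => p.2 < p.1) = false :=
        (zip_adj_no_decrease digits).mpr hchain
      have hsorted : PySem.List.sorted digits (fun c => c) = digits :=
        PySem.List.sorted_eq_self_of_pairwise digits (fun c => c) hp
      simp only [hz, Bool.false_eq_true, if_false, hsorted, BEq.rfl, Bool.true_and]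
      exact runs_eq_counts digits hp
    · have hchain : ¬ digits.IsChain (· ≤ ·) := fun h => hp (List.isChain_iff_pairwise.mp h)
      have hz : (digits.zip (digits.drop 1)).any (fun p => p.2 < p.1) = true := by
        cases h : (digits.zip (digits.drop 1)).any (fun p => p.2 < p.1) with
        | false => exact absurd ((zip_adj_no_decrease digits).mp h) hchain
        | true => rfl
      have hnsorted : (PySem.List.sorted digits (fun c => c) == digits) = false := by
        rw [beq_eq_false_iff_ne]
        intro h
        exact hp (h ▸ PySem.List.sorted_pairwise digits (fun c => c))
      rw [hz, if_pos rfl]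
      simp [hnsorted]
  · simp [hlen]
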